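-- pv_equiv track=rewrite | github.com/qqqwda/pokemeow-autoplay | driver.py | get_next_ball
-- ===== SOURCE A (Python) =====
-- def get_next_ball(current_ball):
--     balls_priority = {
--         "masterball": 5,
--         "premierball": 4,
--         "ultraball": 3,
--         "greatball": 2,
--         "pokeball": 1
--     }
--
--     # Get the priority of the current ball
--     current_priority = balls_priority.get(current_ball)
--
--     # If the current ball is not in the dictionary or it's a Pokeball, return None
--     if current_priority is None or current_priority == 1:
--         return None
--
--     # Find the ball with the next highest priority
--     for ball, priority in sorted(balls_priority.items(), key=lambda item: item[1], reverse=True):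
--         if priority < current_priority:
--             return ball
-- ===== SOURCE B (Python) =====
-- def get_next_ball(current_ball):
--     order = ["masterball", "premierball", "ultraball", "greatball", "pokeball"]
--     if current_ball not in order:
--         return None
--     i = order.index(current_ball)
--     return order[i + 1] if i + 1 < len(order) else None
-- ===== Notes on version B (the rewrite author's own statement) =====
-- stated objective: simpler
-- what changed: Replaces the priority dict, the sort and the priority-comparison loop with a single ordered list read by index: the successor ball is order[index+1].
import Mathlib
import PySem

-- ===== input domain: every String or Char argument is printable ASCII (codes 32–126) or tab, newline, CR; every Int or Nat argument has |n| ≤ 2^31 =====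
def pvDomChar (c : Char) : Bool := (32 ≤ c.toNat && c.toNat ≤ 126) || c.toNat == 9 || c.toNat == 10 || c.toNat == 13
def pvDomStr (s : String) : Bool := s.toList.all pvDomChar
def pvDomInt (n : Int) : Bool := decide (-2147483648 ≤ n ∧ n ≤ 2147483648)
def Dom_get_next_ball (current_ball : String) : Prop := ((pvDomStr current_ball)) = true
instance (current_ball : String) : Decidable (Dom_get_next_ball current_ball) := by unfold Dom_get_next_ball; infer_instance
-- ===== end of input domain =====

-- B replaces A's priority dict + sort + comparison loop with one ordered list read by index (simpler).


-- ===== PORT A =====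
-- the 'for ball, priority in …: if priority < current_priority: return ball' loop
def get_next_ball_loop (items : List (String × Int)) (cp : Int) : Option String :=
  match items with
  | [] => none
  | (ball, priority) :: rest => if priority < cp then some ball else get_next_ball_loop rest cp

def get_next_ball (current_ball : String) : Option String :=
  let balls_priority : PySem.Dict String Int := PySem.Dict.ofList
    [("masterball", 5), ("premierball", 4), ("ultraball", 3), ("greatball", 2), ("pokeball", 1)]
  match balls_priority.get? current_ball with
  | none => none
  | some current_priority =>
    if current_priority == 1 then none
    else
      get_next_ball_loop
        (PySem.List.sorted balls_priority.items (fun it => it.2) (reverse := true))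
        current_priority

-- ===== PORT B =====
def get_next_ball_alt (current_ball : String) : Option String :=
  let order : List String := ["masterball", "premierball", "ultraball", "greatball", "pokeball"]
  if order.contains current_ball then
    match PySem.List.index? order current_ball with
    | none => none   -- unreachable: membership was checked
    | some i => if i + 1 < order.length then order[i + 1]? else none
  else none

-- ===== PRECONDITION & SPEC =====
def Spec_get_next_ball (current_ball : String) (out : Option String) : Prop := out = get_next_ball_alt current_ball
instance (current_ball : String) (out : Option String) : Decidable (Spec_get_next_ball current_ball out) := by unfold Spec_get_next_ball; infer_instance

-- ===== CLAIM (what is proved, stated in full; the proofs are below) =====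
def Claim_equal_get_next_ball : Prop := ∀ (current_ball : String), Dom_get_next_ball current_ball → Spec_get_next_ball current_ball (get_next_ball current_ball)

-- ===== LEMMAS AND PROOFS =====
-- Outside the five known ball names both programs return none.
lemma both_none_of_unknown (s : String)
    (h1 : s ≠ "masterball") (h2 : s ≠ "premierball") (h3 : s ≠ "ultraball")
    (h4 : s ≠ "greatball") (h5 : s ≠ "pokeball") :
    get_next_ball s = none ∧ get_next_ball_alt s = none := by
  have hd : (PySem.Dict.ofList [("masterball", (5:Int)), ("premierball", 4), ("ultraball", 3), ("greatball", 2), ("pokeball", 1)])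
      = PySem.Dict.mk [("masterball", (5:Int)), ("premierball", 4), ("ultraball", 3), ("greatball", 2), ("pokeball", 1)] := by decide
  constructor
  · simp [get_next_ball, hd, Ne.symm h1, Ne.symm h2, Ne.symm h3,
      Ne.symm h4, Ne.symm h5, PySem.Dict.get?]
  · simp [get_next_ball_alt, h1, h2, h3, h4, h5]

-- ===== VERDICT (by name: the statement is the Claim_ definition above) =====
theorem get_next_ball_spec : Claim_equal_get_next_ball := by
  intro s _
  unfold Spec_get_next_ball
  by_cases h1 : s = "masterball"; · subst h1; decide
  by_cases h2 : s = "premierball"; · subst h2; decide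
  by_cases h3 : s = "ultraball"; · subst h3; decide
  by_cases h4 : s = "greatball"; · subst h4; decide
  by_cases h5 : s = "pokeball"; · subst h5; decide
  obtain ⟨ha, hb⟩ := both_none_of_unknown s h1 h2 h3 h4 h5
  rw [ha, hb]
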